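-- pv_equiv track=rewrite | github.com/slhowe/Spiro | python/shuttering/shuttering_HFU_trial/data_analysis_trial.py | __calcDataLoc
-- ===== SOURCE A (Python) =====
-- def __calcDataLoc(locations):
--     dataLoc = []
--     targets = ['Flow', 'Volume', 'TotalTime', 'BreathPhase', 'ShutterState', 'MouthPressureHighGain']
--
--     for index in range(len(targets)):
--         target = targets[index]
--
--         locIndex = 0
--         while locIndex < len(locations):
--             if(locations[locIndex] == target):
--                 dataLoc.append(locIndex)
--                 locIndex = len(locations)
--             locIndex += 1
--     return dataLoc
-- ===== SOURCE B (Python) =====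
-- def __calcDataLoc(locations):
--     table = {}
--     for i, name in enumerate(locations):
--         if name not in table:
--             table[name] = i
--     targets = ['Flow', 'Volume', 'TotalTime', 'BreathPhase', 'ShutterState', 'MouthPressureHighGain']
--     return [table[t] for t in targets if t in table]
-- ===== Notes on version B (the rewrite author's own statement) =====
-- stated objective: faster
-- what changed: Replaces six separate linear scans of locations (one while-loop per target) by a single enumerate pass building a first-index dict, followed by one lookup pass over the fixed targets list.
import Mathlib
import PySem

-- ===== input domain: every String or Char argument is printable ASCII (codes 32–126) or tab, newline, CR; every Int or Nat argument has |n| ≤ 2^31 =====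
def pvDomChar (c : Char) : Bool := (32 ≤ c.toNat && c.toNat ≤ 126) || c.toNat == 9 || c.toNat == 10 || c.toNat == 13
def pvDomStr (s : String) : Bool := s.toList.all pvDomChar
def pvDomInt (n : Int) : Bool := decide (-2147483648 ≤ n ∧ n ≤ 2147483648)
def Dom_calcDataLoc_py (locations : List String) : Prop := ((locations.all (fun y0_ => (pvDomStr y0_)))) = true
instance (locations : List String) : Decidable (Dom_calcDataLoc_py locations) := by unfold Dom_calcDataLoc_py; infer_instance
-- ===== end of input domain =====

-- B builds a first-index table in one pass and looks the six targets up in it,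
-- replacing A's six separate while-loop scans of `locations` (objective: faster, constant-factor).

def pvTargets : List String :=
  ["Flow", "Volume", "TotalTime", "BreathPhase", "ShutterState", "MouthPressureHighGain"]

-- ===== PORT A =====
-- the inner `while locIndex < len(locations)` loop; on a match A appends and jumps locIndex past the end
-- fuel = number of remaining loop iterations (at most locations.length), a pure totality guard
def aScan (locations : List String) (target : String) (fuel : Nat) (locIndex : Nat) (dataLoc : List Int) : List Int :=
  match fuel with
  | 0 => dataLoc
  | fuel' + 1 =>
    if h : locIndex < locations.length then
      if locations[locIndex] == target then
        dataLoc ++ [(locIndex : Int)]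
      else
        aScan locations target fuel' (locIndex + 1) dataLoc
    else
      dataLoc

def calcDataLoc_py (locations : List String) : List Int :=
  pvTargets.foldl (fun dataLoc target => aScan locations target locations.length 0 dataLoc) []

-- ===== PORT B =====
-- `for i, name in enumerate(locations): if name not in table: table[name] = i`
def bTable (locations : List String) : PySem.Dict String Int :=
  (PySem.List.enumerate locations).foldl
    (fun table p => if table.contains p.2 then table else table.insert p.2 p.1)
    PySem.Dict.empty

-- `[table[t] for t in targets if t in table]`
def calcDataLoc_py_alt (locations : List String) : List Int :=
  pvTargets.filterMap (fun t => (bTable locations).get? t)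

-- ===== PRECONDITION & SPEC =====
def Spec_calcDataLoc_py (locations : List String) (out : List Int) : Prop := out = calcDataLoc_py_alt locations
instance (locations : List String) (out : List Int) : Decidable (Spec_calcDataLoc_py locations out) := by unfold Spec_calcDataLoc_py; infer_instance

-- ===== CLAIM (what is proved, stated in full; the proofs are below) =====
def Claim_equal_calcDataLoc_py : Prop := ∀ (locations : List String), Dom_calcDataLoc_py locations → Spec_calcDataLoc_py locations (calcDataLoc_py locations)

-- ===== LEMMAS AND PROOFS =====

-- A's while loop appends the first index of `target` at or after `locIndex`, if any
lemma aScan_eq (l : List String) (t : String) :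
    ∀ (rest : List String) (fuel i : Nat) (d : List Int), l.drop i = rest → rest.length ≤ fuel →
      aScan l t fuel i d = d ++ (((rest.findIdx? (fun s => s == t)).map (fun j => ((i + j : Nat) : Int))).toList) := by
  intro rest
  induction rest with
  | nil =>
      intro fuel i d hdrop _
      have hlen : l.length ≤ i := List.drop_eq_nil_iff.mp hdrop
      cases fuel with
      | zero => simp [aScan]
      | succ fuel' =>
          rw [aScan]
          simp [Nat.not_lt_of_le hlen]
  | cons x xs ih =>
      intro fuel i d hdrop hfuel
      cases fuel with
      | zero => simp at hfuel
      | succ fuel' =>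
          have hi : i < l.length := by
            by_contra hge
            rw [List.drop_eq_nil_iff.mpr (by omega)] at hdrop
            cases hdrop
          have h0 : l[i]? = some x := by
            have h1 : (l.drop i)[0]? = l[i + 0]? := List.getElem?_drop
            rw [hdrop] at h1
            simpa using h1.symm
          have hx : l[i] = x := by
            rw [List.getElem?_eq_getElem hi] at h0
            exact Option.some.inj h0
          have hxs : l.drop (i + 1) = xs := by
            have h2 : l.drop (i + 1) = (l.drop i).drop 1 := by rw [List.drop_drop]
            rw [h2, hdrop]
            rfl
          rw [aScan, dif_pos hi, hx]
          by_cases hxt : (x == t) = true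
          · simp [hxt, List.findIdx?_cons]
          · rw [if_neg hxt, ih fuel' (i + 1) d hxs (by simpa using Nat.lt_succ_iff.mp (by simpa using hfuel)), List.findIdx?_cons, if_neg hxt]
            cases hf : xs.findIdx? (fun s => s == t) with
            | none => simp [hf]
            | some j =>
                simp only [hf, Option.map_some, Option.toList_some]
                congr 2
                omega

-- B's table lookup is the first index of `t` in `l` (offset by the enumerate start)
lemma bFold_get? (l : List String) :
    ∀ (s : Int) (d : PySem.Dict String Int) (t : String),
      ((PySem.List.enumerate l s).foldl
          (fun table p => if table.contains p.2 then table else table.insert p.2 p.1) d).get? t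
        = if d.contains t then d.get? t
          else (l.findIdx? (fun x => x == t)).map (fun j : Nat => s + (j : Int)) := by
  induction l with
  | nil =>
      intro s d t
      by_cases h : d.contains t
      · simp [PySem.List.enumerate, h]
      · simp [PySem.List.enumerate, h,
          (PySem.Dict.get?_eq_none_iff_contains d t).mpr (by simpa using h)]
  | cons x xs ih =>
      intro s d t
      rw [PySem.List.enumerate_cons]
      simp only [List.foldl_cons]
      by_cases hdx : d.contains x = true
      · rw [if_pos hdx, ih]
        by_cases hdt : d.contains t = true
        · simp [hdt]
        · have hxt : ¬((x == t) = true) := by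
            intro hb
            exact hdt ((by simpa using hb : x = t) ▸ hdx)
          rw [if_neg hdt, if_neg hdt, List.findIdx?_cons, if_neg hxt]
          cases hf : xs.findIdx? (fun y => y == t) with
          | none => simp [hf]
          | some j =>
              simp only [Option.map_map, hf, Option.map_some, Function.comp]
              exact congrArg some (by push_cast; ring)
      · rw [if_neg hdx, ih]
        by_cases hxteq : x = t
        · subst hxteq
          rw [if_pos (PySem.Dict.contains_insert_self d x s),
            PySem.Dict.get?_insert_self, if_neg hdx, List.findIdx?_cons]
          simp
        · have hc : (d.insert x s).contains t = d.contains t := by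
            rw [PySem.Dict.contains_insert]
            simp [show ¬((t == x) = true) from by simpa using Ne.symm hxteq]
          rw [hc, PySem.Dict.get?_insert_of_ne d s (Ne.symm hxteq)]
          by_cases hdt : d.contains t = true
          · simp [hdt]
          · have hxt : ¬((x == t) = true) := by simpa using hxteq
            rw [if_neg hdt, if_neg hdt, List.findIdx?_cons, if_neg hxt]
            cases hf : xs.findIdx? (fun y => y == t) with
            | none => simp [hf]
            | some j =>
                simp only [Option.map_map, hf, Option.map_some, Function.comp]
                exact congrArg some (by push_cast; ring)

-- folding "append the optional hit" over the targets is filterMap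
lemma foldl_append_optToList (f : String → Option Int) :
    ∀ (ts : List String) (d : List Int),
      ts.foldl (fun acc t => acc ++ (f t).toList) d = d ++ ts.filterMap f := by
  intro ts
  induction ts with
  | nil => intro d; simp
  | cons t ts ih =>
      intro d
      simp only [List.foldl_cons, List.filterMap_cons, ih]
      cases h : f t <;> simp [h]

-- ===== VERDICT (by name: the statement is the Claim_ definition above) =====
theorem calcDataLoc_py_spec : Claim_equal_calcDataLoc_py := by
  intro locations _
  unfold Spec_calcDataLoc_py calcDataLoc_py calcDataLoc_py_alt
  have hstep : ∀ (d : List Int) (t : String),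
      aScan locations t locations.length 0 d
        = d ++ ((locations.findIdx? (fun x => x == t)).map (fun j => ((j : Nat) : Int))).toList := by
    intro d t
    rw [aScan_eq locations t locations locations.length 0 d (by simp) (le_refl _)]
    simp
  have hB : ∀ t : String,
      (bTable locations).get? t
        = (locations.findIdx? (fun x => x == t)).map (fun j => ((j : Nat) : Int)) := by
    intro t
    unfold bTable
    rw [bFold_get? locations 0 PySem.Dict.empty t, if_neg (by simp [PySem.Dict.contains_empty])]
    cases hf : locations.findIdx? (fun x => x == t) <;> simp [hf]
  calc pvTargets.foldl (fun dataLoc target => aScan locations target locations.length 0 dataLoc) []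
      = pvTargets.foldl (fun acc t =>
          acc ++ ((locations.findIdx? (fun x => x == t)).map (fun j => ((j : Nat) : Int))).toList) [] := by
        exact PySem.List.foldl_congr_mem pvTargets _ _ [] (fun acc t _ => hstep acc t)
    _ = pvTargets.filterMap (fun t =>
          (locations.findIdx? (fun x => x == t)).map (fun j => ((j : Nat) : Int))) := by
        rw [foldl_append_optToList]
        simp
    _ = pvTargets.filterMap (fun t => (bTable locations).get? t) := by
        congr 1
        funext t
        rw [hB t]
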